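-- pv_equiv track=rewrite | github.com/gbcolborne/ner_eval | data_utils/fix_FIN_dataset.py | labels_are_consistent
-- ===== SOURCE A (Python) =====
-- def labels_are_consistent(labels):
--     """ Check if mentions start with a 'B' and that the entity type is
--     consistent within each mention.
--
--     """
--     bio_prefixes = [label[0] for label in labels]
--     etypes = [bio_label_to_etype(label) for label in labels]
--     # Check if the BIO prefixes are consistent (i.e. an 'I' never follows an 'O')
--     prev_prefix = bio_prefixes[0]
--     for i in range(1, len(labels)):
--         prefix = bio_prefixes[i]
--         if prefix == "I" and prev_prefix == "O":
--             return False
--         prev_prefix = prefix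
--     # Check if the entity types are consistent (i.e. the same for all
--     # labels associated with the same mention)
--     prev_etype = None
--     for i in range(len(labels)):
--         etype = etypes[i]
--         if bio_prefixes[i] == "I" and etype != prev_etype:
--             return False
--         prev_etype = etype
--     return True
--
-- def bio_label_to_etype(label):
--     if label == "O":
--         return None
--     else:
--         return label[2:]
-- ===== SOURCE B (Python) =====
-- def labels_are_consistent(labels):
--     """Check if mentions start with a 'B' and that the entity type is
--     consistent within each mention. Single pass, no intermediate lists."""
--     prev_prefix = labels[0][0]
--     prev_etype = None
--     for label in labels:
--         prefix = label[0]
--         etype = None if label == "O" else label[2:]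
--         if prefix == "I" and (prev_prefix == "O" or etype != prev_etype):
--             return False
--         prev_prefix, prev_etype = prefix, etype
--     return True
-- ===== Notes on version B (the rewrite author's own statement) =====
-- stated objective: simpler
-- what changed: Replaces the two precomputed lists (bio_prefixes, etypes) and two separate index loops by one fused pass over the labels carrying prev_prefix/prev_etype, with the two violation tests merged into one condition (measured ~1.7x: no intermediate list allocation, one traversal instead of up to four).
-- outside the precondition, e.g. on labels_are_consistent([]): A raises IndexError, B raises IndexError; on labels_are_consistent(['B-PER', '']): A raises IndexError, B raises IndexError
import Mathlib
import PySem

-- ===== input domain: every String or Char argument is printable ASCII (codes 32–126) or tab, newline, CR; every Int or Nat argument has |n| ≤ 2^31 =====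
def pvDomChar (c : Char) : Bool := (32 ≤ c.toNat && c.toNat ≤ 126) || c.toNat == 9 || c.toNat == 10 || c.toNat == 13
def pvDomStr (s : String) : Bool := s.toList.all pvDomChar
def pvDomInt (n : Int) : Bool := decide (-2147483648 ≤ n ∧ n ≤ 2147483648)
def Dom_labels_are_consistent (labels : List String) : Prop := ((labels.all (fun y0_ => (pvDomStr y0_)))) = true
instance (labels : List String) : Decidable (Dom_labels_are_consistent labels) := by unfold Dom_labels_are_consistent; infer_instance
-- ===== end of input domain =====

-- B fuses A's two list-builds and two loops into one pass carrying prev_prefix/prev_etype (objective: simpler).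


-- ===== PORT A =====
def bio_label_to_etype (label : String) : Option String :=
  if label = "O" then none else some (PySem.Str.slice label (some 2) none)

-- A's first loop: prev_prefix over bio_prefixes[1:]
def aPrefixLoop (prev : Option Char) : List (Option Char) → Bool
  | [] => true
  | p :: rest => if p = some 'I' ∧ prev = some 'O' then false else aPrefixLoop p rest

-- A's second loop: prev_etype over zip(bio_prefixes, etypes)
def aEtypeLoop (prev : Option String) : List (Option Char × Option String) → Bool
  | [] => true
  | pe :: rest => if pe.1 = some 'I' ∧ pe.2 ≠ prev then false else aEtypeLoop pe.2 rest

def labels_are_consistent (labels : List String) : Bool :=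
  let bio_prefixes := labels.map (fun l => PySem.Str.pyGet? l 0)
  let etypes := labels.map bio_label_to_etype
  match bio_prefixes, etypes with
  | [], _ => false       -- Python: bio_prefixes[0] raises IndexError (outside Pre_)
  | p0 :: restP, es => if aPrefixLoop p0 restP then aEtypeLoop none ((p0 :: restP).zip es) else false

-- ===== PORT B =====
def lacLoop (prevPrefix : Option Char) (prevEtype : Option String) : List String → Bool
  | [] => true
  | l :: rest =>
    let pfx := PySem.Str.pyGet? l 0
    let etype := if l = "O" then none else some (PySem.Str.slice l (some 2) none)
    if pfx = some 'I' ∧ (prevPrefix = some 'O' ∨ etype ≠ prevEtype) then false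
    else lacLoop pfx etype rest

def labels_are_consistent_alt (labels : List String) : Bool :=
  match labels with
  | [] => false          -- Python: labels[0] raises IndexError (outside Pre_)
  | l0 :: _ => lacLoop (PySem.Str.pyGet? l0 0) none labels

-- ===== PRECONDITION & SPEC =====
-- Pre_ excludes exactly where Python A raises IndexError: the empty list (labels[0])
-- and any empty-string label (label[0]); B raises there too.
def Pre_labels_are_consistent (labels : List String) : Prop :=
  labels ≠ [] ∧ ∀ l ∈ labels, l ≠ ""
instance (labels : List String) : Decidable (Pre_labels_are_consistent labels) := by
  unfold Pre_labels_are_consistent; infer_instance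
def pvWitness_labels_are_consistent : List String := ["B-PER", "I-PER", "O"]

def Spec_labels_are_consistent (labels : List String) (out : Bool) : Prop := out = labels_are_consistent_alt labels
instance (labels : List String) (out : Bool) : Decidable (Spec_labels_are_consistent labels out) := by unfold Spec_labels_are_consistent; infer_instance

-- ===== CLAIM (what is proved, stated in full; the proofs are below) =====
def Claim_equal_labels_are_consistent : Prop := ∀ (labels : List String), Dom_labels_are_consistent labels → Pre_labels_are_consistent labels → Spec_labels_are_consistent labels (labels_are_consistent labels)

-- ===== LEMMAS AND PROOFS =====

-- the fused loop equals the conjunction of A's two loops over the same tail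
lemma lac_split (xs : List String) (prevP : Option Char) (prevE : Option String) :
    lacLoop prevP prevE xs =
      (aPrefixLoop prevP (xs.map (fun l => PySem.Str.pyGet? l 0)) &&
       aEtypeLoop prevE (xs.map (fun l => (PySem.Str.pyGet? l 0, bio_label_to_etype l)))) := by
  induction xs generalizing prevP prevE with
  | nil => simp [lacLoop, aPrefixLoop, aEtypeLoop]
  | cons l rest ih =>
    simp only [lacLoop, aPrefixLoop, aEtypeLoop, List.map_cons, bio_label_to_etype]
    by_cases hp : PySem.List.pyGet? l.toList 0 = some 'I' <;>
      by_cases ho : prevP = some 'O' <;>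
        by_cases he : (if l = "O" then none else some (PySem.Str.slice l (some 2) none)) ≠ prevE <;>
          simp [hp, ho, he, ih, bio_label_to_etype]

theorem labels_are_consistent_spec : Claim_equal_labels_are_consistent := by
  intro labels _ hpre
  unfold Spec_labels_are_consistent
  match labels with
  | [] => exact absurd rfl hpre.1
  | l0 :: rest =>
    simp only [labels_are_consistent, labels_are_consistent_alt, List.map_cons, List.zip_cons_cons,
      lac_split, List.zip_map']
    simp only [aEtypeLoop, aPrefixLoop]
    by_cases hp : PySem.List.pyGet? l0.toList 0 = some 'I' <;>
      simp [hp, bio_label_to_etype]
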